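-- pv_equiv track=rewrite | github.com/valmir-filho/python | pucpr/ads/2022/raciocinio-computacional/semana06/exvideo.py | filtar_numeros
-- ===== SOURCE A (Python) =====
-- def filtar_numeros(lista):
--     nova_lista = []
--     cont = 0
--     for c in lista:
--         if c % 2 ==0:
--             nova_lista.append(c)
--         else:
--             cont += 1
--     return cont, nova_lista
-- ===== SOURCE B (Python) =====
-- def filtar_numeros(lista):
--     # Divide and conquer over index ranges: split in half, recurse, combine
--     # (odd counts add, even sublists concatenate).
--     def go(lo, hi):
--         n = hi - lo
--         if n == 0:
--             return 0, []
--         if n == 1: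
--             c = lista[lo]
--             if c % 2 == 0:
--                 return 0, [c]
--             return 1, []
--         mid = (lo + hi) // 2
--         c1, e1 = go(lo, mid)
--         c2, e2 = go(mid, hi)
--         return c1 + c2, e1 + e2
--     return go(0, len(lista))
-- ===== Notes on version B (the rewrite author's own statement) =====
-- stated objective: alternative
-- what changed: Replaces A's single accumulating loop by a divide-and-conquer recursion on index ranges: the list is split in half, each half solved recursively, and results combined by adding odd counts and concatenating even sublists.
import Mathlib
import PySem

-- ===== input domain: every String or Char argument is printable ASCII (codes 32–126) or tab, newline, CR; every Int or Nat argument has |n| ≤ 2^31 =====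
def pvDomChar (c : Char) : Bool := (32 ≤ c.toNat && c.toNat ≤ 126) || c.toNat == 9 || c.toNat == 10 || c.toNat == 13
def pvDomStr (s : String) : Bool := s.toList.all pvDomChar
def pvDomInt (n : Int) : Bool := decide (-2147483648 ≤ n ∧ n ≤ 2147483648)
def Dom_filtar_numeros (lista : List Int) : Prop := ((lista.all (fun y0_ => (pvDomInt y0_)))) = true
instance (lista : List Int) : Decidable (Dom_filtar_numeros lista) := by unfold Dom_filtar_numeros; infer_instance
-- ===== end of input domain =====

-- B replaces A's accumulating loop by divide-and-conquer on index ranges; return value only, equal on all inputs.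

-- ===== PORT A =====
-- A: one loop carrying (cont, nova_lista); evens appended, odds counted.
def filtar_numeros (lista : List Int) : Int × List Int :=
  let st := lista.foldl (fun (acc : Int × List Int) c =>
    if PySem.Int.mod c 2 = 0 then (acc.1, acc.2 ++ [c]) else (acc.1 + 1, acc.2)) (0, [])
  (st.1, st.2)

-- ===== PORT B =====
-- B's inner go(lo, hi): split the range in half, recurse, combine.
-- lista[lo] ported with pyGetD (default 0): the index is always in range when go is reached.
-- fuel is only a totality guard (fuel >= hi - lo at every call; the 0 case is never reached);
-- (lo + hi) / 2 is Nat division, exact for Python's // on nonnegative operands.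
def filtarGo (lista : List Int) (fuel lo hi : Nat) : Int × List Int :=
  match fuel with
  | 0 => (0, [])
  | fuel + 1 =>
    if hi - lo = 0 then (0, [])
    else if hi - lo = 1 then
      let c := PySem.List.pyGetD lista (lo : Int) 0
      if PySem.Int.mod c 2 = 0 then (0, [c]) else (1, [])
    else
      let mid := (lo + hi) / 2
      let r1 := filtarGo lista fuel lo mid
      let r2 := filtarGo lista fuel mid hi
      (r1.1 + r2.1, r1.2 ++ r2.2)

def filtar_numeros_alt (lista : List Int) : Int × List Int :=
  filtarGo lista lista.length 0 lista.length

-- ===== PRECONDITION & SPEC =====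
def Spec_filtar_numeros (lista : List Int) (out : Int × List Int) : Prop := out = filtar_numeros_alt lista
instance (lista : List Int) (out : Int × List Int) : Decidable (Spec_filtar_numeros lista out) := by unfold Spec_filtar_numeros; infer_instance

-- ===== CLAIM (what is proved, stated in full; the proofs are below) =====
def Claim_equal_filtar_numeros : Prop := ∀ (lista : List Int), Dom_filtar_numeros lista → Spec_filtar_numeros lista (filtar_numeros lista)

-- ===== LEMMAS AND PROOFS =====

-- Loop invariant for A: from any start state the fold appends the filtered evens and adds the odd count.
theorem filtar_fold_inv (lista : List Int) (c0 : Int) (l0 : List Int) :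
    lista.foldl (fun (acc : Int × List Int) c =>
      if PySem.Int.mod c 2 = 0 then (acc.1, acc.2 ++ [c]) else (acc.1 + 1, acc.2)) (c0, l0)
    = (c0 + ((lista.length : Int) - ((lista.filter (fun c => PySem.Int.mod c 2 = 0)).length : Int)),
       l0 ++ lista.filter (fun c => PySem.Int.mod c 2 = 0)) := by
  induction lista generalizing c0 l0 with
  | nil => simp
  | cons x xs ih =>
    rw [List.foldl_cons]
    by_cases h : PySem.Int.mod x 2 = 0
    · rw [if_pos h, ih]
      rw [List.filter_cons, if_pos (by simpa using h)]
      refine Prod.ext ?_ (by simp)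
      push_cast [List.length_cons]
      ring
    · rw [if_neg h, ih]
      rw [List.filter_cons, if_neg (by simpa using h)]
      refine Prod.ext ?_ rfl
      push_cast [List.length_cons]
      ring

-- Characterisation of B's recursion: on a valid range it returns the odd count and
-- the even elements of the segment lista[lo:hi].
theorem filtarGo_spec (lista : List Int) : ∀ (fuel lo hi : Nat), hi - lo ≤ fuel → hi ≤ lista.length →
    filtarGo lista fuel lo hi =
      (let seg := (lista.drop lo).take (hi - lo)
       ((seg.length : Int) - ((seg.filter (fun c => PySem.Int.mod c 2 = 0)).length : Int),
        seg.filter (fun c => PySem.Int.mod c 2 = 0))) := by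
  intro fuel
  induction fuel with
  | zero =>
    intro lo hi hn hle
    have h0 : hi - lo = 0 := by omega
    simp [filtarGo, h0]
  | succ fuel ih =>
    intro lo hi hn hle
    rw [filtarGo]
    by_cases h0 : hi - lo = 0
    · simp [h0]
    · rw [if_neg h0]
      by_cases h1 : hi - lo = 1
      · rw [if_pos h1, h1]
        have hlo : lo < lista.length := by omega
        have hseg : (lista.drop lo).take 1 = [lista[lo]] := by
          rw [List.take_one_drop_eq_of_lt_length hlo]; simp
        have hget : PySem.List.pyGetD lista (lo : Int) 0 = lista[lo] := by
          simp [List.getD, hlo]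
        rw [hget, hseg]
        by_cases he : PySem.Int.mod lista[lo] 2 = 0
        · have he' : (2 : Int) ∣ lista[lo] := (PySem.Int.mod_eq_zero_iff_dvd _ _).1 he
          simp [he']
        · have he' : ¬ (2 : Int) ∣ lista[lo] := fun h => he ((PySem.Int.mod_eq_zero_iff_dvd _ _).2 h)
          simp [he']
      · rw [if_neg h1]
        have hmidlo : lo < (lo + hi) / 2 := by omega
        have hmidhi : (lo + hi) / 2 < hi := by omega
        show ((filtarGo lista fuel lo ((lo + hi) / 2)).1 + (filtarGo lista fuel ((lo + hi) / 2) hi).1,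
              (filtarGo lista fuel lo ((lo + hi) / 2)).2 ++ (filtarGo lista fuel ((lo + hi) / 2) hi).2) = _
        rw [ih lo ((lo + hi) / 2) (by omega) (by omega),
            ih ((lo + hi) / 2) hi (by omega) hle]
        have hsplit : (lista.drop lo).take (hi - lo)
            = (lista.drop lo).take ((lo + hi) / 2 - lo)
              ++ (lista.drop ((lo + hi) / 2)).take (hi - (lo + hi) / 2) := by
          have h2 : hi - lo = ((lo + hi) / 2 - lo) + (hi - (lo + hi) / 2) := by omega
          have h3 : lo + ((lo + hi) / 2 - lo) = (lo + hi) / 2 := by omega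
          rw [h2, List.take_add, List.drop_drop, h3]
        rw [hsplit]
        simp only [List.filter_append, List.length_append]
        refine Prod.ext ?_ rfl
        push_cast
        ring

-- ===== VERDICT (by name: the statement is the Claim_ definition above) =====
theorem filtar_numeros_spec : Claim_equal_filtar_numeros := by
  intro lista _
  unfold Spec_filtar_numeros filtar_numeros filtar_numeros_alt
  rw [filtar_fold_inv, filtarGo_spec lista lista.length 0 lista.length (by omega) le_rfl]
  simp
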